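-- pv_equiv track=rewrite | github.com/GeeN33/select_sorted | main.py | uniqs
-- ===== SOURCE A (Python) =====
-- def uniqs(inputstring):
--     """
--     Количество уникальных подстрок
--     """
--     substrings = [""]
--     for i in range(0, len(inputstring) + 1):
--         for j in range(i + 1, len(inputstring) + 1):
--             substr = inputstring[i:j]
--             substrings.append(substr)
--     uniq = set()
--     for ss in substrings:
--         uniq.add(ss)
--     return uniq
-- ===== SOURCE B (Python) =====
-- def uniqs(inputstring):
--     """
--     Количество уникальных подстрок
--     """
--     # Suffix-trie construction: walk each suffix character by character through a
--     # nested-dict trie; a substring is added to the result set exactly when its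
--     # path is new in the trie (structural dedup, no slicing).
--     result = {""}
--     root = {}
--     for i in range(len(inputstring)):
--         node = root
--         cur = ""
--         for ch in inputstring[i:]:
--             cur += ch
--             if ch in node:
--                 node = node[ch]
--             else:
--                 child = {}
--                 node[ch] = child
--                 node = child
--                 result.add(cur)
--     return result
-- ===== Notes on version B (the rewrite author's own statement) =====
-- stated objective: alternative
-- what changed: B replaces A's slice-every-(i,j)-pair-then-dump-into-a-set approach by building a suffix trie: each suffix is walked character by character through a nested-dict trie and a substring is added to the result set exactly when its trie path is new.
import Mathlib
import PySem

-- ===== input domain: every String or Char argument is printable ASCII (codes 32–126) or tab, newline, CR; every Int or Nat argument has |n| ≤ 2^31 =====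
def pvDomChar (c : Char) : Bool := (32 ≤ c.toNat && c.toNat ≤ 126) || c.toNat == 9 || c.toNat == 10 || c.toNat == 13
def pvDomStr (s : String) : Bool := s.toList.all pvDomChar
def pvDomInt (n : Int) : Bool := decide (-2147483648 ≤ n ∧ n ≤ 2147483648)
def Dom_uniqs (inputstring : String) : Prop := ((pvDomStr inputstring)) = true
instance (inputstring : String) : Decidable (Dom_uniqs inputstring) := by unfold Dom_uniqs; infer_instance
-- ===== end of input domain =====

-- B builds the set of substrings through a suffix trie (structural dedup) instead of A's
-- slice-all-(i,j)-pairs-into-a-set; equal result sets (as PySem.Set values) are proved.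

-- ===== PORT A =====
def uniqs (inputstring : String) : List String :=
  let n : Int := PySem.Str.len inputstring
  let substrings : List String :=
    (PySem.List.pyRange 0 (n + 1) 1).foldl (fun acc i =>
      (PySem.List.pyRange (i + 1) (n + 1) 1).foldl (fun acc2 j =>
        acc2 ++ [PySem.Str.slice inputstring (some i) (some j)]) acc) [""]
  substrings.foldl (fun uniq ss => PySem.Set.add uniq ss) PySem.Set.empty

-- ===== PORT B =====
-- Python's nested-dict trie: a node is an association list of (child char, child node);
-- encoded as a mutual pair instead of a nested inductive.
mutual
inductive PvTrie : Type where
  | mk : PvTrieL → PvTrie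
inductive PvTrieL : Type where
  | nil : PvTrieL
  | cons : Char → PvTrie → PvTrieL → PvTrieL
end

-- 'ch in node' / 'node[ch]' on a trie node
def pvLookup : PvTrieL → Char → Option PvTrie
  | .nil, _ => none
  | .cons c t r, ch => if c = ch then some t else pvLookup r ch

-- 'node[ch] = child' (dict assignment: overwrite in place, insertion order kept)
def pvSet : PvTrieL → Char → PvTrie → PvTrieL
  | .nil, ch, v => .cons ch v .nil
  | .cons c t r, ch, v => if c = ch then .cons c v r else .cons c t (pvSet r ch v)

-- the inner 'for ch in inputstring[i:]' loop of Source B: walks/extends the trie along the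
-- suffix, adding cur to the result set exactly when the path is new; Python's in-place
-- dict mutation through the 'node' alias is rendered by rebuilding the path on the way out.
def pvInsertSuffix : PvTrie → List Char → List Char → PySem.Set String → PvTrie × PySem.Set String
  | t, _, [], res => (t, res)
  | .mk l, cur, ch :: rest, res =>
    let cur' := cur ++ [ch]
    match pvLookup l ch with
    | some child =>
      let (child', res') := pvInsertSuffix child cur' rest res
      (.mk (pvSet l ch child'), res')
    | none =>
      let (child', res') := pvInsertSuffix (.mk .nil) cur' rest (PySem.Set.add res (String.ofList cur'))
      (.mk (pvSet l ch child'), res')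

def uniqs_alt (inputstring : String) : List String :=
  let n : Int := PySem.Str.len inputstring
  ((PySem.List.pyRange 0 n 1).foldl (fun st i =>
      pvInsertSuffix st.1 [] (PySem.Str.slice inputstring (some i) none).toList st.2)
    (PvTrie.mk .nil, PySem.Set.ofList [""])).2

-- ===== PRECONDITION & SPEC =====
def Spec_uniqs (inputstring : String) (out : List String) : Prop := out = uniqs_alt inputstring
instance (inputstring : String) (out : List String) : Decidable (Spec_uniqs inputstring out) := by unfold Spec_uniqs; infer_instance

-- ===== CLAIM (what is proved, stated in full; the proofs are below) =====
def Claim_equal_uniqs : Prop := ∀ (inputstring : String), Dom_uniqs inputstring → Spec_uniqs inputstring (uniqs inputstring)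

-- ===== LEMMAS AND PROOFS =====

-- trie membership: the strings whose path exists in the trie
def pvHas : PvTrie → List Char → Bool
  | _, [] => true
  | .mk l, c :: r =>
    match pvLookup l c with
    | some t => pvHas t r
    | none => false

-- the strings the inner loop appends for accumulated prefix cur and remaining chars l
def pvPrefixes : List Char → List Char → List String
  | _, [] => []
  | cur, c :: r => String.ofList (cur ++ [c]) :: pvPrefixes (cur ++ [c]) r

theorem ofList_inj {a b : List Char} (h : String.ofList a = String.ofList b) : a = b := by
  have := congrArg String.toList h
  simpa using this

theorem pvLookup_pvSet : ∀ (l : PvTrieL) (ch c : Char) (v : PvTrie),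
    pvLookup (pvSet l ch v) c = if c = ch then some v else pvLookup l c
  | .nil, ch, c, v => by
    by_cases h : c = ch
    · subst h; simp [pvSet, pvLookup]
    · simp [pvSet, pvLookup, h, Ne.symm h]
  | .cons c' t r, ch, c, v => by
    by_cases h1 : c' = ch
    · subst h1
      by_cases h2 : c = c'
      · subst h2; simp [pvSet, pvLookup]
      · simp [pvSet, pvLookup, h2, Ne.symm h2]
    · by_cases h2 : c' = c
      · subst h2
        simp [pvSet, pvLookup, h1]
      · simp [pvSet, pvLookup, h1, h2, pvLookup_pvSet r ch c v]

theorem pvHas_nil_iff (w : List Char) : pvHas (PvTrie.mk .nil) w = true ↔ w = [] := by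
  cases w with
  | nil => simp [pvHas]
  | cons c r => simp [pvHas, pvLookup]

theorem pvHas_cons_iff (l : PvTrieL) (c : Char) (r : List Char) :
    pvHas (PvTrie.mk l) (c :: r) = true ↔ ∃ t, pvLookup l c = some t ∧ pvHas t r = true := by
  show (match pvLookup l c with | some t => pvHas t r | none => false) = true ↔ _
  cases h : pvLookup l c <;> simp

theorem mem_foldl_setAdd (l : List String) (res : PySem.Set String) (x : String) :
    x ∈ l.foldl PySem.Set.add res ↔ x ∈ res ∨ x ∈ l := by
  induction l generalizing res with
  | nil => simp
  | cons y r ih => simp only [List.foldl_cons, ih, PySem.Set.mem_add, List.mem_cons]; tauto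

theorem mem_pvPrefixes (l : List Char) : ∀ (cur : List Char) (x : String),
    x ∈ pvPrefixes cur l ↔ ∃ p, p ≠ [] ∧ p <+: l ∧ x = String.ofList (cur ++ p) := by
  induction l with
  | nil => intro cur x; simp [pvPrefixes]
  | cons c r ih =>
    intro cur x
    simp only [pvPrefixes, List.mem_cons, ih (cur ++ [c])]
    constructor
    · rintro (rfl | ⟨p, hp, hpre, rfl⟩)
      · exact ⟨[c], by simp, ⟨r, rfl⟩, by simp⟩
      · exact ⟨c :: p, by simp, List.cons_prefix_cons.mpr ⟨rfl, hpre⟩, by simp⟩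
    · rintro ⟨p, hp, hpre, rfl⟩
      cases p with
      | nil => exact absurd rfl hp
      | cons c0 q =>
        obtain ⟨hd, hq⟩ := List.cons_prefix_cons.mp hpre
        subst hd
        cases q with
        | nil => left; simp
        | cons c1 q1 =>
          right
          exact ⟨c1 :: q1, by simp, hq, by simp⟩

-- reduction equations for the two branches of the inner loop
theorem pvInsertSuffix_cons_some (l : PvTrieL) (cur : List Char) (ch : Char) (rest : List Char)
    (res : PySem.Set String) (child : PvTrie) (h : pvLookup l ch = some child) :
    pvInsertSuffix (.mk l) cur (ch :: rest) res =
      (PvTrie.mk (pvSet l ch (pvInsertSuffix child (cur ++ [ch]) rest res).1),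
       (pvInsertSuffix child (cur ++ [ch]) rest res).2) := by
  rcases hp : pvInsertSuffix child (cur ++ [ch]) rest res with ⟨c', r'⟩
  simp only [pvInsertSuffix, h, hp]

theorem pvInsertSuffix_cons_none (l : PvTrieL) (cur : List Char) (ch : Char) (rest : List Char)
    (res : PySem.Set String) (h : pvLookup l ch = none) :
    pvInsertSuffix (.mk l) cur (ch :: rest) res =
      (PvTrie.mk (pvSet l ch (pvInsertSuffix (.mk .nil) (cur ++ [ch]) rest
          (PySem.Set.add res (String.ofList (cur ++ [ch])))).1),
       (pvInsertSuffix (.mk .nil) (cur ++ [ch]) rest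
          (PySem.Set.add res (String.ofList (cur ++ [ch])))).2) := by
  rcases hp : pvInsertSuffix (.mk .nil) (cur ++ [ch]) rest
      (PySem.Set.add res (String.ofList (cur ++ [ch]))) with ⟨c', r'⟩
  simp only [pvInsertSuffix, h, hp]

-- the heart: the inner loop adds to the set, and to the trie, exactly the nonempty
-- prefixes of cs (each prefixed by cur), given trie-below matches set
theorem pvInsertSuffix_spec (cs : List Char) : ∀ (t : PvTrie) (cur : List Char) (res : PySem.Set String),
    (∀ w : List Char, w ≠ [] → (pvHas t w = true ↔ String.ofList (cur ++ w) ∈ res)) →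
    (pvInsertSuffix t cur cs res).2 = (pvPrefixes cur cs).foldl PySem.Set.add res ∧
    (∀ w : List Char, pvHas (pvInsertSuffix t cur cs res).1 w = true ↔
        (pvHas t w = true ∨ (w ≠ [] ∧ w <+: cs))) := by
  induction cs with
  | nil =>
    intro t cur res _
    refine ⟨rfl, fun w => ?_⟩
    simp only [pvInsertSuffix]
    simp [List.prefix_nil]
  | cons ch rest ih =>
    intro t cur res hinv
    obtain ⟨l⟩ := t
    cases hlk : pvLookup l ch with
    | some child =>
      have hinv' : ∀ w : List Char, w ≠ [] →
          (pvHas child w = true ↔ String.ofList ((cur ++ [ch]) ++ w) ∈ res) := by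
        intro w hw
        have := hinv (ch :: w) (by simp)
        simpa [pvHas, hlk, List.append_assoc] using this
      obtain ⟨h1, h2⟩ := ih child (cur ++ [ch]) res hinv'
      have hmem : String.ofList (cur ++ [ch]) ∈ res := by
        have := hinv [ch] (by simp)
        exact this.mp (by simp [pvHas, hlk])
      rw [pvInsertSuffix_cons_some l cur ch rest res child hlk]
      constructor
      · simp only [pvPrefixes, List.foldl_cons, PySem.Set.add_of_mem hmem]
        exact h1
      · intro w
        cases w with
        | nil => simp [pvHas]
        | cons c r =>
          rw [pvHas_cons_iff, pvHas_cons_iff, pvLookup_pvSet]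
          by_cases hc : c = ch
          · subst hc
            rw [if_pos rfl, hlk]
            constructor
            · rintro ⟨t, ht, hht⟩
              obtain rfl := Option.some.inj ht
              rw [h2 r] at hht
              rcases hht with h | ⟨hr, hpre⟩
              · exact Or.inl ⟨child, rfl, h⟩
              · exact Or.inr ⟨by simp, List.cons_prefix_cons.mpr ⟨rfl, hpre⟩⟩
            · rintro (⟨t, ht, hht⟩ | ⟨-, hpre⟩)
              · obtain rfl := Option.some.inj ht
                exact ⟨_, rfl, (h2 r).mpr (Or.inl hht)⟩
              · obtain ⟨-, hpre⟩ := List.cons_prefix_cons.mp hpre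
                by_cases hr : r = []
                · subst hr; exact ⟨_, rfl, (h2 []).mpr (Or.inl (by simp [pvHas]))⟩
                · exact ⟨_, rfl, (h2 r).mpr (Or.inr ⟨hr, hpre⟩)⟩
          · rw [if_neg hc]
            constructor
            · rintro ⟨t, ht, hht⟩
              exact Or.inl ⟨t, ht, hht⟩
            · rintro (⟨t, ht, hht⟩ | ⟨-, hpre⟩)
              · exact ⟨t, ht, hht⟩
              · exact absurd (List.cons_prefix_cons.mp hpre).1 hc
    | none =>
      have hnotmem : ∀ w : List Char, String.ofList ((cur ++ [ch]) ++ w) ∉ res := by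
        intro w hmem
        have := (hinv (ch :: w) (by simp)).mpr (by simpa [List.append_assoc] using hmem)
        simp [pvHas, hlk] at this
      have hinv' : ∀ w : List Char, w ≠ [] →
          (pvHas (PvTrie.mk .nil) w = true ↔
            String.ofList ((cur ++ [ch]) ++ w) ∈ PySem.Set.add res (String.ofList (cur ++ [ch]))) := by
        intro w hw
        simp only [PySem.Set.mem_add, pvHas_nil_iff]
        constructor
        · intro h; exact absurd h hw
        · rintro (h | h)
          · exact absurd h (hnotmem w)
          · exfalso
            have := congrArg List.length (ofList_inj h)
            simp at this
            exact hw this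
      obtain ⟨h1, h2⟩ := ih (PvTrie.mk .nil) (cur ++ [ch])
        (PySem.Set.add res (String.ofList (cur ++ [ch]))) hinv'
      rw [pvInsertSuffix_cons_none l cur ch rest res hlk]
      constructor
      · simp only [pvPrefixes, List.foldl_cons]
        exact h1
      · intro w
        cases w with
        | nil => simp [pvHas]
        | cons c r =>
          rw [pvHas_cons_iff, pvHas_cons_iff, pvLookup_pvSet]
          by_cases hc : c = ch
          · subst hc
            rw [if_pos rfl, hlk]
            constructor
            · rintro ⟨t, ht, hht⟩
              obtain rfl := Option.some.inj ht
              rw [h2 r] at hht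
              rcases hht with h | ⟨hr, hpre⟩
              · rw [pvHas_nil_iff] at h
                subst h
                exact Or.inr ⟨by simp, List.cons_prefix_cons.mpr ⟨rfl, List.nil_prefix⟩⟩
              · exact Or.inr ⟨by simp, List.cons_prefix_cons.mpr ⟨rfl, hpre⟩⟩
            · rintro (⟨t, ht, hht⟩ | ⟨-, hpre⟩)
              · simp at ht
              · obtain ⟨-, hpre⟩ := List.cons_prefix_cons.mp hpre
                by_cases hr : r = []
                · subst hr; exact ⟨_, rfl, (h2 []).mpr (Or.inl (by simp [pvHas]))⟩
                · exact ⟨_, rfl, (h2 r).mpr (Or.inr ⟨hr, hpre⟩)⟩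
          · rw [if_neg hc]
            constructor
            · rintro ⟨t, ht, hht⟩
              exact Or.inl ⟨t, ht, hht⟩
            · rintro (⟨t, ht, hht⟩ | ⟨-, hpre⟩)
              · exact ⟨t, ht, hht⟩
              · exact absurd (List.cons_prefix_cons.mp hpre).1 hc

-- the canonical list of substrings contributed by start index k
def subsFrom (cs : List Char) (k : Nat) : List String :=
  (List.range (cs.length - k)).map (fun j => String.ofList ((cs.drop k).take (j + 1)))

theorem pvPrefixes_eq (l : List Char) : ∀ cur : List Char,
    pvPrefixes cur l = (List.range l.length).map (fun j => String.ofList (cur ++ l.take (j + 1))) := by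
  induction l with
  | nil => intro cur; simp [pvPrefixes]
  | cons c r ih =>
    intro cur
    simp only [pvPrefixes, List.length_cons, List.range_succ_eq_map, List.map_cons,
      List.map_map, ih (cur ++ [c])]
    refine congrArg₂ List.cons ?_ ?_
    · simp
    · apply List.map_congr_left
      intro j _
      simp [Function.comp, List.take_succ_cons, List.append_assoc]

theorem pvPrefixes_drop (cs : List Char) (k : Nat) :
    pvPrefixes [] (cs.drop k) = subsFrom cs k := by
  rw [pvPrefixes_eq, subsFrom]
  simp

-- the combined loop invariant, by induction over the number of outer iterations
theorem loop_inv (cs : List Char) (k : Nat) :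
    (((List.range k).foldl (fun st i => pvInsertSuffix st.1 [] (cs.drop i) st.2)
        (PvTrie.mk .nil, PySem.Set.ofList [""])).2 =
      (List.range k).foldl (fun acc i => (subsFrom cs i).foldl PySem.Set.add acc)
        (PySem.Set.ofList [""])) ∧
    (∀ w : List Char, w ≠ [] →
      (pvHas ((List.range k).foldl (fun st i => pvInsertSuffix st.1 [] (cs.drop i) st.2)
          (PvTrie.mk .nil, PySem.Set.ofList [""])).1 w = true ↔
        String.ofList w ∈ ((List.range k).foldl (fun st i => pvInsertSuffix st.1 [] (cs.drop i) st.2)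
          (PvTrie.mk .nil, PySem.Set.ofList [""])).2)) := by
  induction k with
  | zero =>
    constructor
    · simp
    · intro w hw
      simp only [List.range_zero, List.foldl_nil]
      simp [pvHas_nil_iff, PySem.Set.mem_ofList]
  | succ k ih =>
    obtain ⟨ih1, ih2⟩ := ih
    set st := (List.range k).foldl (fun st i => pvInsertSuffix st.1 [] (cs.drop i) st.2)
        (PvTrie.mk .nil, PySem.Set.ofList [""]) with hst
    have hinv : ∀ w : List Char, w ≠ [] → (pvHas st.1 w = true ↔ String.ofList ([] ++ w) ∈ st.2) := by
      intro w hw; simpa using ih2 w hw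
    obtain ⟨h1, h2⟩ := pvInsertSuffix_spec (cs.drop k) st.1 [] st.2 hinv
    have hrange : List.range (k + 1) = List.range k ++ [k] := List.range_succ
    rw [hrange]
    simp only [List.foldl_append, List.foldl_cons, List.foldl_nil, ← hst]
    refine ⟨?_, ?_⟩
    · rw [h1, pvPrefixes_drop, ih1]
    · intro w hw
      rw [h2 w, h1, mem_foldl_setAdd, mem_pvPrefixes]
      constructor
      · rintro (h | ⟨hw', hpre⟩)
        · exact Or.inl ((ih2 w hw).mp h)
        · exact Or.inr ⟨w, hw, hpre, by simp⟩
      · rintro (h | ⟨p, hp, hpre, hx⟩)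
        · exact Or.inl ((ih2 w hw).mpr h)
        · have : w = p := ofList_inj (by simpa using hx)
          subst this
          exact Or.inr ⟨hw, hpre⟩

-- A-side: the slice at natural indices is the canonical substring
theorem strSlice_eq (s : String) (a b : Nat) :
    PySem.Str.slice s (some (a : Int)) (some (b : Int)) = String.ofList ((s.toList.drop a).take (b - a)) := by
  apply String.toList_inj.mp
  simp [PySem.List.slice_natCast]

theorem strSlice_from (s : String) (a : Nat) :
    (PySem.Str.slice s (some (a : Int)) none).toList = s.toList.drop a := by
  simp [PySem.List.slice_from_natCast]

-- fold-into-a-set of a concatenated build = nested folds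
theorem setfold_listfold {α : Type} (I : List α) (g : α → List String) :
    ∀ (init E : List String),
    (I.foldl (fun acc i => acc ++ g i) init).foldl PySem.Set.add E =
      I.foldl (fun u i => (g i).foldl PySem.Set.add u) (init.foldl PySem.Set.add E) := by
  induction I with
  | nil => intro init E; rfl
  | cons i I' ih =>
    intro init E
    simp only [List.foldl_cons]
    rw [ih (init ++ g i) E, List.foldl_append]

-- A's port in canonical form
theorem uniqs_eq (s : String) :
    uniqs s = (List.range (s.toList.length + 1)).foldl
      (fun acc i => (subsFrom s.toList i).foldl PySem.Set.add acc) (PySem.Set.ofList [""]) := by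
  simp only [uniqs, PySem.Str.len_eq, PySem.List.foldl_append_singleton_eq_map]
  rw [setfold_listfold]
  rw [PySem.List.pyRange_one]
  rw [show (((s.toList.length : Int)) + 1 - 0).toNat = s.toList.length + 1 from by omega]
  rw [List.foldl_map]
  have hinit : ([""] : List String).foldl PySem.Set.add PySem.Set.empty = PySem.Set.ofList [""] := rfl
  rw [hinit]
  apply PySem.List.foldl_congr_mem
  intro acc k hk
  have h0 : (0 : Int) + (k : Int) = (k : Int) := by omega
  rw [h0]
  congr 1
  rw [PySem.List.pyRange_one]
  rw [show (((s.toList.length : Int)) + 1 - ((k : Int) + 1)).toNat = s.toList.length - k from by omega]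
  rw [List.map_map, subsFrom]
  apply List.map_congr_left
  intro j _
  simp only [Function.comp]
  rw [show (k : Int) + 1 + (j : Int) = ((k + 1 + j : Nat) : Int) from by push_cast; ring]
  rw [strSlice_eq]
  rw [show k + 1 + j - k = j + 1 from by omega]

-- B's port in canonical form
theorem uniqs_alt_eq (s : String) :
    uniqs_alt s = ((List.range s.toList.length).foldl
      (fun st i => pvInsertSuffix st.1 [] (s.toList.drop i) st.2)
      (PvTrie.mk .nil, PySem.Set.ofList [""])).2 := by
  simp only [uniqs_alt, PySem.Str.len_eq]
  rw [PySem.List.pyRange_one]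
  rw [show (((s.toList.length : Int)) - 0).toNat = s.toList.length from by omega]
  rw [List.foldl_map]
  congr 1
  apply PySem.List.foldl_congr_mem
  intro stacc k hk
  have h0 : (0 : Int) + (k : Int) = (k : Int) := by omega
  rw [h0, strSlice_from]

theorem subsFrom_last (cs : List Char) : subsFrom cs cs.length = [] := by
  simp [subsFrom]

-- ===== VERDICT (by name: the statement is the Claim_ definition above) =====
theorem uniqs_spec : Claim_equal_uniqs := by
  intro s _
  unfold Spec_uniqs
  rw [uniqs_eq, uniqs_alt_eq, List.range_succ, List.foldl_append]
  simp only [List.foldl_cons, List.foldl_nil, subsFrom_last]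
  exact ((loop_inv s.toList s.toList.length).1).symm
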